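-- pv_equiv track=rewrite | github.com/pokerdio/generic | aoc/2024/day24.py | desiredZ
-- ===== SOURCE A (Python) =====
-- def wireName(prefix, idx):
--     leading_zero = "0" if idx < 10 else ""
--     return prefix + leading_zero + str(idx)
--
-- def desiredZ(wires, n):
--     ret = {}
--     ret["z00"] = wires["x00"] ^ wires["y00"]
--     carry = 1 if wires["x00"] and wires["y00"] else 0
--     n = int(max(w for w in wires if w.startswith("x"))[1:]) + 1
--
--     for idx in range(1, n + 1):
--         s = wires.get(wireName("x", idx), 0) + wires.get(wireName("y", idx), 0) + carry
--         carry = s // 2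
--         ret[wireName("z", idx)] = s % 2
--     return ret
-- ===== SOURCE B (Python) =====
-- def wireName(prefix, idx):
--     leading_zero = "0" if idx < 10 else ""
--     return prefix + leading_zero + str(idx)
--
-- def desiredZ(wires, n):
--     top = int(max(w for w in wires if w.startswith("x"))[1:]) + 1
--     ret = {"z00": wires["x00"] ^ wires["y00"]}
--     t = 2 if wires["x00"] and wires["y00"] else 0
--     for i in range(1, top + 1):
--         t += (wires.get(wireName("x", i), 0) + wires.get(wireName("y", i), 0)) << i
--     for i in range(1, top + 1):
--         ret[wireName("z", i)] = (t >> i) & 1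
--     return ret
-- ===== Notes on version B (the rewrite author's own statement) =====
-- stated objective: alternative
-- what changed: The sequential ripple-carry loop (carry threaded through every iteration) is replaced by summing all wire contributions into one big integer t = 2*carry0 + sum((x_i+y_i) << i) and then reading each z-bit off t with shift-and-mask, so no carry state is propagated between iterations.
import Mathlib
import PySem

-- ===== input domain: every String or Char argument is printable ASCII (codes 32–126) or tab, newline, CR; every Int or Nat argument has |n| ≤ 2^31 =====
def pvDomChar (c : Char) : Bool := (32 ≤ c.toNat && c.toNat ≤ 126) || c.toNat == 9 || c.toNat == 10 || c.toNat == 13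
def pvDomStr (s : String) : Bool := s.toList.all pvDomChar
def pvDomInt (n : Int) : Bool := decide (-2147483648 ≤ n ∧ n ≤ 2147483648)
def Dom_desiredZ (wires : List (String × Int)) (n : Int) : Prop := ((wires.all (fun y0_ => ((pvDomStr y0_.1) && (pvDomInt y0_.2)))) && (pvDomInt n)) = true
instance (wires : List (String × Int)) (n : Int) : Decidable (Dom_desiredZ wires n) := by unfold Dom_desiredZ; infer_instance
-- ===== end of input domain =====

-- B replaces A's ripple-carry loop with one big-integer sum t and per-bit shift-and-mask extraction (alternative algorithm, same asymptotic cost).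


-- ===== PORT A =====
-- helper wireName, used by both Pythons
def wireName (pfx : String) (idx : Int) : String :=
  pfx ++ (if idx < 10 then "0" else "") ++ PySem.Int.toStr idx

def desiredZ (wires : List (String × Int)) (n : Int) : List (String × Int) :=
  let d := PySem.Dict.ofList wires
  match d.get? "x00", d.get? "y00" with
  | some x0, some y0 =>
    -- n is rebound by A before first use; the incoming n is dead
    match PySem.List.max? (d.keys.filter (fun w => PySem.Str.startswith w "x")) (fun w => w) with
    | some mx =>
      match PySem.Int.ofStr? (PySem.Str.slice mx (some 1) none) with
      | some m =>
        let n := m + 1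
        let st := (PySem.List.pyRange 1 (n + 1) 1).foldl
          (fun (st : PySem.Dict String Int × Int) idx =>
            let s := d.getD (wireName "x" idx) 0 + d.getD (wireName "y" idx) 0 + st.2
            (st.1.insert (wireName "z" idx) (PySem.Int.mod s 2), PySem.Int.floordiv s 2))
          (PySem.Dict.empty.insert "z00" (PySem.Int.bxor x0 y0),
           if x0 ≠ 0 ∧ y0 ≠ 0 then 1 else 0)
        st.1.items
      | none => []   -- int(...) raises ValueError: outside Pre_
    | none => []     -- max() on empty raises ValueError: outside Pre_
  | _, _ => []       -- KeyError on "x00"/"y00": outside Pre_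

-- ===== PORT B =====
-- B's own copy of the wireName helper (structurally identical to the one in Source B)
def wireNameB (pfx : String) (idx : Int) : String :=
  pfx ++ (if idx < 10 then "0" else "") ++ PySem.Int.toStr idx

def desiredZ_alt (wires : List (String × Int)) (n : Int) : List (String × Int) :=
  let d := PySem.Dict.ofList wires
  (PySem.List.max? (d.keys.filter (fun w => PySem.Str.startswith w "x")) (fun w => w)).elim []
    (fun mx =>
      (PySem.Int.ofStr? (PySem.Str.slice mx (some 1) none)).elim []
        (fun m =>
          (d.get? "x00").elim [] (fun x0 =>
            (d.get? "y00").elim [] (fun y0 =>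
              let top := m + 1
              let ret0 := PySem.Dict.empty.insert "z00" (PySem.Int.bxor x0 y0)
              let t0 : Int := if x0 ≠ 0 ∧ y0 ≠ 0 then 2 else 0
              let t := (PySem.List.pyRange 1 (top + 1) 1).foldl
                (fun t i => t + ((d.getD (wireNameB "x" i) 0 + d.getD (wireNameB "y" i) 0) <<< i.toNat)) t0
              let ret := (PySem.List.pyRange 1 (top + 1) 1).foldl
                (fun r i => r.insert (wireNameB "z" i) (PySem.Int.band (t >>> i.toNat) 1)) ret0
              ret.items))))

-- ===== PRECONDITION & SPEC =====
-- Pre_ excludes exactly the inputs where A raises: missing "x00"/"y00" key (KeyError),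
-- no key starting with "x" (ValueError from max), or the largest x-key's suffix not an int literal (ValueError from int()).
def Pre_desiredZ (wires : List (String × Int)) (n : Int) : Prop :=
  (let d := PySem.Dict.ofList wires
   (d.contains "x00") && (d.contains "y00") &&
   (match PySem.List.max? (d.keys.filter (fun w => PySem.Str.startswith w "x")) (fun w => w) with
    | some mx => (PySem.Int.ofStr? (PySem.Str.slice mx (some 1) none)).isSome
    | none => false)) = true
instance (wires : List (String × Int)) (n : Int) : Decidable (Pre_desiredZ wires n) := by unfold Pre_desiredZ; infer_instance

def pvWitness_desiredZ : (List (String × Int)) × Int := ([("x00", 1), ("y00", 1)], 0)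

def Spec_desiredZ (wires : List (String × Int)) (n : Int) (out : List (String × Int)) : Prop := out = desiredZ_alt wires n
instance (wires : List (String × Int)) (n : Int) (out : List (String × Int)) : Decidable (Spec_desiredZ wires n out) := by unfold Spec_desiredZ; infer_instance

-- ===== CLAIM (what is proved, stated in full; the proofs are below) =====
def Claim_equal_desiredZ : Prop := ∀ (wires : List (String × Int)) (n : Int), Dom_desiredZ wires n → Pre_desiredZ wires n → Spec_desiredZ wires n (desiredZ wires n)

-- ===== LEMMAS AND PROOFS =====

-- the bit of t at position p, for t = s·2^p + 2^(p+1)·K, is s mod 2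
lemma bit_here (s K : Int) (p : Nat) :
    PySem.Int.band ((s * 2 ^ p + 2 ^ (p + 1) * K) >>> p) 1 = PySem.Int.mod s 2 := by
  rw [PySem.Int.band_one, PySem.Int.mod_eq_emod_of_pos (by norm_num),
      PySem.Int.mod_eq_emod_of_pos (by norm_num), Int.shiftRight_eq_div_pow]
  push_cast
  have h : s * 2 ^ p + 2 ^ (p + 1) * K = (s + 2 * K) * 2 ^ p := by ring
  rw [h, Int.mul_ediv_cancel _ (by positivity)]
  omega

-- bits strictly above p do not see the low bit r: split s = 2·c' + r with 0 ≤ r < 2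
lemma bit_above (c' r K : Int) (hr0 : 0 ≤ r) (hr1 : r < 2) (p q : Nat) (hpq : p < q) :
    PySem.Int.band (((2 * c' + r) * 2 ^ p + 2 ^ (p + 1) * K) >>> q) 1
      = PySem.Int.band ((c' * 2 ^ (p + 1) + 2 ^ (p + 1) * K) >>> q) 1 := by
  obtain ⟨j, rfl⟩ : ∃ j, q = p + 1 + j := ⟨q - (p + 1), by omega⟩
  rw [PySem.Int.band_one, PySem.Int.band_one, PySem.Int.mod_eq_emod_of_pos (by norm_num),
      PySem.Int.mod_eq_emod_of_pos (by norm_num), Int.shiftRight_eq_div_pow, Int.shiftRight_eq_div_pow]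
  push_cast
  have h1 : (2 * c' + r) * 2 ^ p + 2 ^ (p + 1) * K = 2 ^ p * (2 * (c' + K) + r) := by ring
  have h2 : c' * 2 ^ (p + 1) + 2 ^ (p + 1) * K = 2 ^ (p + 1) * (c' + K) := by ring
  have h3 : (2 : Int) ^ (p + 1 + j) = 2 ^ p * (2 * 2 ^ j) := by ring
  have h4 : (2 : Int) ^ (p + 1 + j) = 2 ^ (p + 1) * 2 ^ j := by ring
  rw [h1, h3, Int.mul_ediv_mul_of_pos _ _ (by positivity)]
  have h45 : (2 : Int) ^ p * (2 * 2 ^ j) = 2 ^ (p + 1) * 2 ^ j := by ring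
  conv_rhs => rw [h2, h45, Int.mul_ediv_mul_of_pos _ _ (by positivity)]
  have h5 : (2 * (c' + K) + r) / (2 * 2 ^ j) = (2 * (c' + K) + r) / 2 / 2 ^ j := by
    exact (Int.ediv_ediv_of_nonneg (by norm_num)).symm
  rw [h5]
  have h6 : (2 * (c' + K) + r) / 2 = c' + K := by omega
  rw [h6]

-- main loop correspondence: A's ripple-carry fold equals B's bit-extraction fold
lemma loop_eq (g : Int → Int) :
    ∀ (len : Nat) (a : Int), 0 ≤ a → ∀ (c : Int) (ret : PySem.Dict String Int) (t : Int),
      t = c * 2 ^ a.toNat + ((PySem.List.pyRange a (a + len) 1).map (fun i => g i * 2 ^ i.toNat)).sum →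
      ((PySem.List.pyRange a (a + len) 1).foldl
          (fun (st : PySem.Dict String Int × Int) idx =>
            (st.1.insert (wireName "z" idx) (PySem.Int.mod (g idx + st.2) 2),
             PySem.Int.floordiv (g idx + st.2) 2))
          (ret, c)).1
        = (PySem.List.pyRange a (a + len) 1).foldl
            (fun r i => r.insert (wireName "z" i) (PySem.Int.band (t >>> i.toNat) 1)) ret := by
  intro len
  induction len with
  | zero =>
    intro a ha c ret t ht
    rw [show a + (0 : Nat) = a by simp, PySem.List.pyRange_one_eq_nil le_rfl]
    simp
  | succ k ih =>
    intro a ha c ret t ht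
    have hcons : PySem.List.pyRange a (a + ((k : Nat) + 1 : Nat)) 1
        = a :: PySem.List.pyRange (a + 1) ((a + 1) + (k : Nat)) 1 := by
      rw [PySem.List.pyRange_one_cons (by push_cast; omega)]
      congr 1
      push_cast
      ring_nf
    rw [hcons] at ht ⊢
    simp only [List.foldl_cons, List.map_cons, List.sum_cons] at ht ⊢
    set s := g a + c with hs
    set c' := PySem.Int.floordiv s 2 with hc'
    set r := PySem.Int.mod s 2 with hr
    -- decompose the tail sum as a multiple of 2^(a.toNat+1)
    obtain ⟨K, hK⟩ : (2 : Int) ^ (a.toNat + 1) ∣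
        ((PySem.List.pyRange (a + 1) ((a + 1) + (k : Nat)) 1).map (fun i => g i * 2 ^ i.toNat)).sum := by
      apply List.dvd_sum
      intro x hx
      simp only [List.mem_map] at hx
      obtain ⟨i, hi, rfl⟩ := hx
      rw [PySem.List.mem_pyRange_one] at hi
      exact Dvd.dvd.mul_left (pow_dvd_pow 2 (by omega)) _
    have hsc : s = 2 * c' + r := by
      have := PySem.Int.floordiv_mul_add_mod s 2
      rw [← hc', ← hr] at this; omega
    have hr0 : 0 ≤ r := PySem.Int.mod_nonneg s (by norm_num)
    have hr1 : r < 2 := PySem.Int.mod_lt s (by norm_num)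
    have ht' : t = s * 2 ^ a.toNat + 2 ^ (a.toNat + 1) * K := by
      rw [ht, hK]; ring
    -- head insert agrees
    have hhead : PySem.Int.band (t >>> a.toNat) 1 = PySem.Int.mod s 2 := by
      rw [ht', bit_here]
    -- tail: IH at a+1 with carry c' and t' carrying the same high bits as t
    have ha1 : ((a + 1).toNat) = a.toNat + 1 := by omega
    have htail := ih (a + 1) (by omega) c'
      (ret.insert (wireName "z" a) (PySem.Int.mod s 2))
      (c' * 2 ^ (a + 1).toNat
        + ((PySem.List.pyRange (a + 1) ((a + 1) + (k : Nat)) 1).map (fun i => g i * 2 ^ i.toNat)).sum)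
      rfl
    rw [htail, hhead]
    apply PySem.List.foldl_congr_mem
    intro acc i hi
    rw [PySem.List.mem_pyRange_one] at hi
    congr 1
    have hq : a.toNat < i.toNat := by omega
    have := bit_above c' r K hr0 hr1 a.toNat i.toNat hq
    rw [← hsc, ← ht'] at this
    rw [this, hK, ha1]

-- ===== VERDICT (by name: the statement is the Claim_ definition above) =====
theorem desiredZ_spec : Claim_equal_desiredZ := by
  intro wires n _hdom hpre
  unfold Spec_desiredZ desiredZ desiredZ_alt
  unfold Pre_desiredZ at hpre
  simp only [Bool.and_eq_true] at hpre
  obtain ⟨⟨hcx, hcy⟩, hrest⟩ := hpre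
  rw [PySem.Dict.contains_eq_isSome_get?, Option.isSome_iff_exists] at hcx hcy
  obtain ⟨x0, hx⟩ := hcx
  obtain ⟨y0, hy⟩ := hcy
  rcases hmax : PySem.List.max? ((PySem.Dict.ofList wires).keys.filter
      (fun w => PySem.Str.startswith w "x")) (fun w => w) with _ | mx
  · rw [hmax] at hrest; simp at hrest
  rw [hmax] at hrest
  rcases hofs : PySem.Int.ofStr? (PySem.Str.slice mx (some 1) none) with _ | m
  · simp [hofs] at hrest
  simp only [hx, hy, hmax, hofs, Option.elim_some,
    show wireNameB = wireName from rfl]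
  -- both sides: items of the corresponding dict folds
  by_cases hm : m + 1 + 1 ≤ 1
  · rw [PySem.List.pyRange_one_eq_nil hm]
    simp
  · push_neg at hm
    set d := PySem.Dict.ofList wires with hd
    set g : Int → Int := fun i => d.getD (wireName "x" i) 0 + d.getD (wireName "y" i) 0 with hg
    set c : Int := if x0 ≠ 0 ∧ y0 ≠ 0 then 1 else 0 with hc
    set ret0 := PySem.Dict.empty.insert "z00" (PySem.Int.bxor x0 y0) with hret0
    have hlen : (m + 1 + 1 : Int) = 1 + ((m + 1).toNat : Int) := by omega
    rw [hlen]
    set t := (PySem.List.pyRange 1 (1 + ((m + 1).toNat : Int)) 1).foldl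
      (fun t i => t + (g i <<< i.toNat)) (if x0 ≠ 0 ∧ y0 ≠ 0 then 2 else 0) with htdef
    have ht : t = c * 2 ^ (1 : Int).toNat
        + ((PySem.List.pyRange 1 (1 + ((m + 1).toNat : Int)) 1).map
            (fun i => g i * 2 ^ i.toNat)).sum := by
      rw [htdef, PySem.List.foldl_add]
      simp only [Int.shiftLeft_eq]
      rw [hc]
      split_ifs <;> norm_num
    have := loop_eq g (m + 1).toNat 1 (by norm_num) c ret0 t ht
    rw [show (1 : Int) + ((m + 1).toNat : Int) = 1 + (((m + 1).toNat : Nat) : Int) from rfl] at this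
    exact congrArg PySem.Dict.items this
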